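-- pv_equiv track=rewrite | github.com/paul5404/Python_coding | main.py | roomnumber
-- ===== SOURCE A (Python) =====
-- def roomnumber(s):
--     ans = 0
--     temp = [0] * 10
--     flag = 1
--     for number in s:
--         temp[number] += 1
--
--     if temp[6] != temp[9]:
--         diff = abs(temp[6] - temp[9])
--         for i in range(diff // 2):
--             if temp[6] > temp[9]:
--                 temp[6] -= 1
--                 temp[9] += 1
--             else:
--                 temp[9] -= 1
--                 temp[6] += 1
--     ans = max(temp)
--
--     return ans
-- ===== SOURCE B (Python) =====
-- def roomnumber(s):
--     counts = [0] * 10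
--     for x in s:
--         counts[x] += 1
--     balanced69 = (counts[6] + counts[9] + 1) // 2
--     return max(max(counts[:6] + counts[7:9]), balanced69)
-- ===== Notes on version B (the rewrite author's own statement) =====
-- stated objective: simpler
-- what changed: B keeps one counting pass but drops A's iterative diff//2 rebalancing loop entirely, computing the balanced 6/9 value in closed form as (counts[6]+counts[9]+1)//2 and taking the max against the other eight counts.
import Mathlib
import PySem

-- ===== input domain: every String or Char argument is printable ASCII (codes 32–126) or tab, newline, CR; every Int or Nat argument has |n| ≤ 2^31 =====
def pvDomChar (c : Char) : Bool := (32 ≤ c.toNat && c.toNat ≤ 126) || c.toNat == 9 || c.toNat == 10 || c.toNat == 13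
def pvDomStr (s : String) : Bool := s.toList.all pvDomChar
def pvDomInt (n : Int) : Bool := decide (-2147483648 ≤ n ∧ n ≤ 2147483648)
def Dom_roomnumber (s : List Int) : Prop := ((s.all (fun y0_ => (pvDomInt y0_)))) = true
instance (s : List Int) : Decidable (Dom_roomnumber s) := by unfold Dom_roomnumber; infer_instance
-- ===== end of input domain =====

-- B keeps the counting pass but replaces A's iterative 6/9 rebalancing loop by the closed-form balanced value (c6+c9+1)//2; equivalence proved on lists whose elements lie between -10 and 9 (A raises IndexError otherwise).


-- ===== PORT A =====
-- temp[number] += 1 : read temp[number] (IndexError → none, excluded by Pre_), then write back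
def pvCountStep (temp : List Int) (number : Int) : List Int :=
  match PySem.List.pyGet? temp number with
  | some v => PySem.List.pySetD temp number (v + 1)
  | none => temp

-- one iteration of A's balancing loop (the loop variable i is unused)
def pvBalStep (temp : List Int) (_i : Int) : List Int :=
  if PySem.List.pyGetD temp 6 0 > PySem.List.pyGetD temp 9 0 then
    let t := PySem.List.pySetD temp 6 (PySem.List.pyGetD temp 6 0 - 1)
    PySem.List.pySetD t 9 (PySem.List.pyGetD t 9 0 + 1)
  else
    let t := PySem.List.pySetD temp 9 (PySem.List.pyGetD temp 9 0 - 1)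
    PySem.List.pySetD t 6 (PySem.List.pyGetD t 6 0 + 1)

def roomnumber (s : List Int) : Int :=
  let temp : List Int := List.replicate 10 0
  let temp := s.foldl pvCountStep temp
  let temp :=
    if PySem.List.pyGetD temp 6 0 ≠ PySem.List.pyGetD temp 9 0 then
      let diff := |PySem.List.pyGetD temp 6 0 - PySem.List.pyGetD temp 9 0|
      (PySem.List.pyRange 0 (PySem.Int.floordiv diff 2) 1).foldl pvBalStep temp
    else temp
  -- max(temp): temp always has 10 elements, so max? is some; .getD 0 only unwraps
  (PySem.List.max? temp (fun y => y)).getD 0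

-- ===== PORT B =====
-- counts[x] += 1 : read counts[x] (IndexError → none, excluded by Pre_), then write back
def pvAltCountStep (counts : List Int) (x : Int) : List Int :=
  match PySem.List.pyGet? counts x with
  | some v => PySem.List.pySetD counts x (v + 1)
  | none => counts

def roomnumber_alt (s : List Int) : Int :=
  let counts := s.foldl pvAltCountStep (List.replicate 10 0)
  -- balanced69 = (counts[6] + counts[9] + 1) // 2
  let balanced69 :=
    PySem.Int.floordiv (PySem.List.pyGetD counts 6 0 + PySem.List.pyGetD counts 9 0 + 1) 2
  -- max(max(counts[:6] + counts[7:9]), balanced69)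
  let others := PySem.List.slice counts none (some 6) ++ PySem.List.slice counts (some 7) (some 9)
  max ((PySem.List.max? others (fun y => y)).getD 0) balanced69

-- ===== PRECONDITION & SPEC =====
-- Pre_ excludes exactly the inputs on which A (and B) raises IndexError: an element below -10 or above 9
def Pre_roomnumber (s : List Int) : Prop := ∀ x ∈ s, -10 ≤ x ∧ x ≤ 9
instance (s : List Int) : Decidable (Pre_roomnumber s) := by unfold Pre_roomnumber; infer_instance

def pvWitness_roomnumber : List Int := [6, 9, 9, 0, -1]

def Spec_roomnumber (s : List Int) (out : Int) : Prop := out = roomnumber_alt s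
instance (s : List Int) (out : Int) : Decidable (Spec_roomnumber s out) := by unfold Spec_roomnumber; infer_instance

-- ===== CLAIM (what is proved, stated in full; the proofs are below) =====
def Claim_equal_roomnumber : Prop := ∀ (s : List Int), Dom_roomnumber s → Pre_roomnumber s → Spec_roomnumber s (roomnumber s)

-- ===== LEMMAS AND PROOFS =====

def pvCnt (s : List Int) (d : Int) : Int := (s.countP (fun x => PySem.Int.mod x 10 = d) : Int)

lemma countStep_eq (temp : List Int) (hlen : temp.length = 10) (x : Int)
    (h1 : -10 ≤ x) (h2 : x ≤ 9) :
    pvCountStep temp x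
      = temp.set (PySem.Int.mod x 10).toNat (temp.getD (PySem.Int.mod x 10).toNat 0 + 1) := by
  have hm : PySem.Int.mod x 10 = x % 10 := PySem.Int.mod_eq_emod_of_pos (by norm_num)
  have hidx : PySem.List.pyIdx? temp.length x = some ((x % 10).toNat) := by
    simp only [PySem.List.pyIdx?, hlen]
    split_ifs with h3 h4 h5 <;> (congr 1; omega)
  have hk : (x % 10).toNat < temp.length := by omega
  have hget : PySem.List.pyGet? temp x = some (temp[(x % 10).toNat]) := by
    simp [PySem.List.pyGet?, hidx, List.getElem?_eq_getElem hk]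
  have hgd : temp.getD (x % 10).toNat 0 = temp[(x % 10).toNat] := List.getD_eq_getElem temp 0 hk
  simp [pvCountStep, hget, PySem.List.pySetD, PySem.List.pySet?, hidx, List.getD,
        List.getElem?_eq_getElem hk]

lemma count_fold (s : List Int) : ∀ (temp : List Int), temp.length = 10 →
    (∀ x ∈ s, -10 ≤ x ∧ x ≤ 9) →
    s.foldl pvCountStep temp
      = (List.range 10).map (fun d => temp.getD d 0 + pvCnt s (d : Int)) := by
  induction s with
  | nil =>
    intro temp hlen _
    simp only [List.foldl_nil]
    apply List.ext_getElem (by simp [hlen])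
    intro i h1 h2
    have hi : i < temp.length := by simpa [hlen] using h1
    simp [pvCnt, List.getD, List.getElem?_eq_getElem hi]
  | cons x s ih =>
    intro temp hlen hs
    have hx := hs x (by simp)
    rw [List.foldl_cons, countStep_eq temp hlen x hx.1 hx.2,
        ih _ (by simp [hlen]) (fun z hz => hs z (by simp [hz]))]
    apply List.map_congr_left
    intro d hd
    simp only [List.mem_range] at hd
    have hm9 : 0 ≤ PySem.Int.mod x 10 := PySem.Int.mod_nonneg x (by norm_num)
    have hm10 : PySem.Int.mod x 10 < 10 := PySem.Int.mod_lt x (by norm_num)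
    have hkk : (PySem.Int.mod x 10).toNat < temp.length := by omega
    have hcnt : pvCnt (x :: s) (d : Int)
        = pvCnt s (d : Int) + (if PySem.Int.mod x 10 = (d : Int) then 1 else 0) := by
      by_cases h : PySem.Int.mod x 10 = (d : Int) <;>
        simp [pvCnt, List.countP_cons]
    rw [hcnt]
    by_cases hmd : PySem.Int.mod x 10 = (d : Int)
    · have hd' : (PySem.Int.mod x 10).toNat = d := by omega
      rw [List.getD_eq_getElem _ 0 (by simp [hlen]; omega),
          List.getElem_set, if_pos hd', if_pos hmd,
          List.getD_eq_getElem temp 0 (by omega : d < temp.length)]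
      rw [hd'] at hkk ⊢
      rw [List.getD_eq_getElem temp 0 hkk]
      ring
    · have hd' : (PySem.Int.mod x 10).toNat ≠ d := by omega
      rw [List.getD_eq_getElem _ 0 (by simp [hlen]; omega),
          List.getElem_set, if_neg hd', if_neg hmd,
          List.getD_eq_getElem temp 0 (by omega : d < temp.length)]
      ring

lemma count_fold0 (s : List Int) (hs : ∀ x ∈ s, -10 ≤ x ∧ x ≤ 9) :
    s.foldl pvCountStep (List.replicate 10 0)
      = [pvCnt s 0, pvCnt s 1, pvCnt s 2, pvCnt s 3, pvCnt s 4,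
         pvCnt s 5, pvCnt s 6, pvCnt s 7, pvCnt s 8, pvCnt s 9] := by
  rw [count_fold s (List.replicate 10 0) (by simp) hs]
  rw [show List.range 10 = [0,1,2,3,4,5,6,7,8,9] from rfl]
  norm_num [List.getD]

-- B's counting step has the same definition as A's
lemma altCountStep_eq : pvAltCountStep = pvCountStep := rfl

lemma balStep_explicit (c0 c1 c2 c3 c4 c5 x c7 c8 y i : Int) :
    pvBalStep [c0,c1,c2,c3,c4,c5,x,c7,c8,y] i
      = if x > y then [c0,c1,c2,c3,c4,c5,x-1,c7,c8,y+1]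
        else [c0,c1,c2,c3,c4,c5,x+1,c7,c8,y-1] := by
  unfold pvBalStep
  rw [show PySem.List.pyGetD [c0,c1,c2,c3,c4,c5,x,c7,c8,y] 6 0 = x from rfl,
      show PySem.List.pyGetD [c0,c1,c2,c3,c4,c5,x,c7,c8,y] 9 0 = y from rfl]
  by_cases h : x > y
  · rw [if_pos h, if_pos h]; rfl
  · rw [if_neg h, if_neg h]; rfl

lemma balUp (n : Nat) : ∀ (c0 c1 c2 c3 c4 c5 x c7 c8 y : Int), 2*(n:Int) ≤ x - y →
    (List.range n).foldl (fun t (j : Nat) => pvBalStep t ((0:Int) + (j:Int)))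
        [c0,c1,c2,c3,c4,c5,x,c7,c8,y]
      = [c0,c1,c2,c3,c4,c5,x - (n:Int),c7,c8,y + (n:Int)] := by
  induction n with
  | zero => intro _ _ _ _ _ _ x _ _ y _; norm_num
  | succ n ih =>
    intro c0 c1 c2 c3 c4 c5 x c7 c8 y h
    rw [List.range_succ, List.foldl_append, ih _ _ _ _ _ _ _ _ _ _ (by push_cast at h ⊢; omega)]
    simp only [List.foldl_cons, List.foldl_nil, balStep_explicit]
    rw [if_pos (by push_cast at h ⊢; omega)]
    push_cast
    norm_num
    constructor <;> ring

lemma balDown (n : Nat) : ∀ (c0 c1 c2 c3 c4 c5 x c7 c8 y : Int), 2*(n:Int) ≤ y - x →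
    (List.range n).foldl (fun t (j : Nat) => pvBalStep t ((0:Int) + (j:Int)))
        [c0,c1,c2,c3,c4,c5,x,c7,c8,y]
      = [c0,c1,c2,c3,c4,c5,x + (n:Int),c7,c8,y - (n:Int)] := by
  induction n with
  | zero => intro _ _ _ _ _ _ x _ _ y _; norm_num
  | succ n ih =>
    intro c0 c1 c2 c3 c4 c5 x c7 c8 y h
    rw [List.range_succ, List.foldl_append, ih _ _ _ _ _ _ _ _ _ _ (by push_cast at h ⊢; omega)]
    simp only [List.foldl_cons, List.foldl_nil, balStep_explicit]
    rw [if_neg (by push_cast at h ⊢; omega)]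
    push_cast
    norm_num
    constructor <;> ring

-- B's side, reduced to the ten counts
lemma alt_eq (s : List Int) (hs : ∀ x ∈ s, -10 ≤ x ∧ x ≤ 9) :
    roomnumber_alt s
      = max ((PySem.List.max? [pvCnt s 0, pvCnt s 1, pvCnt s 2, pvCnt s 3, pvCnt s 4,
                               pvCnt s 5, pvCnt s 7, pvCnt s 8] (fun y => y)).getD 0)
            (PySem.Int.floordiv (pvCnt s 6 + pvCnt s 9 + 1) 2) := by
  unfold roomnumber_alt
  rw [altCountStep_eq, count_fold0 s hs]
  rfl

-- ===== VERDICT (by name: the statement is the Claim_ definition above) =====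
theorem roomnumber_spec : Claim_equal_roomnumber := by
  intro s _hDom hPre
  unfold Spec_roomnumber
  rw [alt_eq s hPre, PySem.Int.floordiv_eq_ediv_of_pos (by norm_num),
      PySem.List.max?_id_cons, Option.getD_some]
  simp only [List.foldl]
  simp only [roomnumber]
  rw [count_fold0 s hPre,
      show PySem.List.pyGetD [pvCnt s 0, pvCnt s 1, pvCnt s 2, pvCnt s 3, pvCnt s 4,
            pvCnt s 5, pvCnt s 6, pvCnt s 7, pvCnt s 8, pvCnt s 9] 6 0 = pvCnt s 6 from rfl,
      show PySem.List.pyGetD [pvCnt s 0, pvCnt s 1, pvCnt s 2, pvCnt s 3, pvCnt s 4,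
            pvCnt s 5, pvCnt s 6, pvCnt s 7, pvCnt s 8, pvCnt s 9] 9 0 = pvCnt s 9 from rfl]
  have hnn : ∀ d : Int, 0 ≤ pvCnt s d := fun d => Int.natCast_nonneg _
  by_cases h69 : pvCnt s 6 = pvCnt s 9
  · rw [if_neg (by simp [h69])]
    rw [PySem.List.max?_id_cons, Option.getD_some]
    simp only [List.foldl]
    have h6 := hnn 6
    apply eq_of_forall_ge_iff
    intro z
    simp only [max_le_iff]
    omega
  · rw [if_pos h69, PySem.Int.floordiv_eq_ediv_of_pos (by norm_num),
        PySem.List.pyRange_one, sub_zero, List.foldl_map]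
    rcases lt_or_gt_of_ne h69 with hlt | hgt
    · rw [show |pvCnt s 6 - pvCnt s 9| = pvCnt s 9 - pvCnt s 6 from by
          rw [abs_of_neg (by omega)]; ring]
      have hn : ((((pvCnt s 9 - pvCnt s 6) / 2).toNat : Int)) = (pvCnt s 9 - pvCnt s 6) / 2 := by
        omega
      rw [balDown ((pvCnt s 9 - pvCnt s 6) / 2).toNat _ _ _ _ _ _ _ _ _ _ (by omega),
          PySem.List.max?_id_cons, Option.getD_some]
      simp only [List.foldl]
      apply eq_of_forall_ge_iff
      intro z
      simp only [max_le_iff]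
      omega
    · rw [show |pvCnt s 6 - pvCnt s 9| = pvCnt s 6 - pvCnt s 9 from abs_of_pos (by omega)]
      have hn : ((((pvCnt s 6 - pvCnt s 9) / 2).toNat : Int)) = (pvCnt s 6 - pvCnt s 9) / 2 := by
        omega
      rw [balUp ((pvCnt s 6 - pvCnt s 9) / 2).toNat _ _ _ _ _ _ _ _ _ _ (by omega),
          PySem.List.max?_id_cons, Option.getD_some]
      simp only [List.foldl]
      apply eq_of_forall_ge_iff
      intro z
      simp only [max_le_iff]
      omega
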